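-- pv_equiv track=rewrite | github.com/mae-kelly/plus | core/cmdb_discovery.py | _infer_host_type
-- ===== SOURCE A (Python) =====
-- from typing import Dict, List, Any, Optional, Tuple
--
-- def _infer_host_type(hostname: str, host: Dict) -> str:
--     """Infer host type from hostname patterns"""
--     hostname_lower = hostname.lower()
--
--     if any(kw in hostname_lower for kw in ['web', 'www', 'nginx', 'apache']):
--         return 'web_server'
--     elif any(kw in hostname_lower for kw in ['db', 'database', 'mysql', 'postgres', 'mongo']):
--         return 'database'
--     elif any(kw in hostname_lower for kw in ['api', 'rest', 'graphql']):
--         return 'api_server'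
--     elif any(kw in hostname_lower for kw in ['cache', 'redis', 'memcache']):
--         return 'cache'
--     elif any(kw in hostname_lower for kw in ['queue', 'rabbit', 'kafka', 'sqs']):
--         return 'message_queue'
--     elif any(kw in hostname_lower for kw in ['lb', 'load', 'balancer', 'haproxy']):
--         return 'load_balancer'
--
--     return 'compute'
-- ===== SOURCE B (Python) =====
-- _KEYWORD_PRIORITY = {
--     'web': 0, 'www': 0, 'nginx': 0, 'apache': 0,
--     'db': 1, 'database': 1, 'mysql': 1, 'postgres': 1, 'mongo': 1,
--     'api': 2, 'rest': 2, 'graphql': 2,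
--     'cache': 3, 'redis': 3, 'memcache': 3,
--     'queue': 4, 'rabbit': 4, 'kafka': 4, 'sqs': 4,
--     'lb': 5, 'load': 5, 'balancer': 5, 'haproxy': 5,
-- }
-- _LABELS = ['web_server', 'database', 'api_server', 'cache',
--            'message_queue', 'load_balancer', 'compute']
--
-- def _infer_host_type(hostname: str, host: dict) -> str:
--     """Infer host type by a single left-to-right scan of the hostname:
--     at each position, any keyword starting there lowers the best (smallest)
--     matched priority; the label of the smallest matched priority wins."""
--     h = hostname.lower()
--     best = 6
--     for i in range(len(h)):
--         for kw, p in _KEYWORD_PRIORITY.items():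
--             if h.startswith(kw, i):
--                 best = min(best, p)
--     return _LABELS[best]
-- ===== Notes on version B (the rewrite author's own statement) =====
-- stated objective: alternative
-- what changed: Instead of testing six keyword lists for containment in order (first-match if/elif chain), B scans the lowered hostname once position by position, checking which keywords of a priority dict start at each position and keeping the minimum matched priority, then returns that priority's label.
import Mathlib
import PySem

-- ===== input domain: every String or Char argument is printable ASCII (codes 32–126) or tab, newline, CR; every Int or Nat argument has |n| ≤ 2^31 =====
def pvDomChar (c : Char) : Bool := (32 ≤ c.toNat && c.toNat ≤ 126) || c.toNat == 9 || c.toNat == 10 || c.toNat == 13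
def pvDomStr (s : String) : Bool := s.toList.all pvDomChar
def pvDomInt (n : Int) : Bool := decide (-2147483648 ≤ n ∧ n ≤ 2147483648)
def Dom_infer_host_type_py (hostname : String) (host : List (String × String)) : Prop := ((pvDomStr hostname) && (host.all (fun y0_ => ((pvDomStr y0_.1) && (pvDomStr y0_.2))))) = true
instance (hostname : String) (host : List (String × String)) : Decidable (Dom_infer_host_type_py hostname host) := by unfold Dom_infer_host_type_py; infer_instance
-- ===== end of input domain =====

-- B replaces A's six-branch keyword-containment if/elif chain by a single left-to-right
-- positional scan of the hostname that minimises the priority of every keyword starting at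
-- each position (objective: alternative); same return value everywhere.

-- ===== PORT A =====
-- literal transliteration of the if/elif chain of _infer_host_type
def infer_host_type_py (hostname : String) (host : List (String × String)) : String :=
  let hostname_lower := PySem.Str.lower hostname
  if (["web", "www", "nginx", "apache"].any (fun kw => PySem.Str.isIn kw hostname_lower)) then
    "web_server"
  else if (["db", "database", "mysql", "postgres", "mongo"].any (fun kw => PySem.Str.isIn kw hostname_lower)) then
    "database"
  else if (["api", "rest", "graphql"].any (fun kw => PySem.Str.isIn kw hostname_lower)) then
    "api_server"
  else if (["cache", "redis", "memcache"].any (fun kw => PySem.Str.isIn kw hostname_lower)) then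
    "cache"
  else if (["queue", "rabbit", "kafka", "sqs"].any (fun kw => PySem.Str.isIn kw hostname_lower)) then
    "message_queue"
  else if (["lb", "load", "balancer", "haproxy"].any (fun kw => PySem.Str.isIn kw hostname_lower)) then
    "load_balancer"
  else
    "compute"

-- ===== PORT B =====
-- the dict _KEYWORD_PRIORITY of Source B, in insertion order
def pvKw : List (String × Nat) :=
  [("web", 0), ("www", 0), ("nginx", 0), ("apache", 0),
   ("db", 1), ("database", 1), ("mysql", 1), ("postgres", 1), ("mongo", 1),
   ("api", 2), ("rest", 2), ("graphql", 2),
   ("cache", 3), ("redis", 3), ("memcache", 3),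
   ("queue", 4), ("rabbit", 4), ("kafka", 4), ("sqs", 4),
   ("lb", 5), ("load", 5), ("balancer", 5), ("haproxy", 5)]

-- the list _LABELS of Source B
def pvLabels : List String :=
  ["web_server", "database", "api_server", "cache", "message_queue", "load_balancer", "compute"]

-- the nested scan of Source B: 'for i in range(len(h)): for kw, p in items: if h.startswith(kw, i): best = min(best, p)'
-- (h.startswith(kw, i) with 0 ≤ i is exactly Chars.startswith (h.drop i) kw.toList)
def pvBest (h : List Char) : Nat :=
  (List.range h.length).foldl
    (fun best i =>
      pvKw.foldl
        (fun best kp =>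
          if PySem.Chars.startswith (h.drop i) kp.1.toList then min best kp.2 else best)
        best)
    6

def infer_host_type_py_alt (hostname : String) (host : List (String × String)) : String :=
  let h := (PySem.Str.lower hostname).toList
  -- _LABELS[best]: best ≤ 6 always, so the index is in range; getD's default is never used
  pvLabels.getD (pvBest h) ""

-- ===== PRECONDITION & SPEC =====
def Spec_infer_host_type_py (hostname : String) (host : List (String × String)) (out : String) : Prop := out = infer_host_type_py_alt hostname host
instance (hostname : String) (host : List (String × String)) (out : String) : Decidable (Spec_infer_host_type_py hostname host out) := by unfold Spec_infer_host_type_py; infer_instance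

-- ===== CLAIM (what is proved, stated in full; the proofs are below) =====
def Claim_equal_infer_host_type_py : Prop := ∀ (hostname : String) (host : List (String × String)), Dom_infer_host_type_py hostname host → Spec_infer_host_type_py hostname host (infer_host_type_py hostname host)

-- ===== LEMMAS AND PROOFS =====

-- generic facts about folds that only ever lower a Nat accumulator
theorem pv_fold_le {α : Type} (step : Nat → α → Nat) (hle : ∀ b x, step b x ≤ b) :
    ∀ (l : List α) (b : Nat), l.foldl step b ≤ b := by
  intro l
  induction l with
  | nil => intro b; exact le_refl b
  | cons x l ih => intro b; exact le_trans (ih (step b x)) (hle b x)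

theorem pv_fold_le_of_mem {α : Type} (step : Nat → α → Nat) (hle : ∀ b x, step b x ≤ b)
    (x : α) (q : Nat) (hx : ∀ b, step b x ≤ q) :
    ∀ (l : List α) (b : Nat), x ∈ l → l.foldl step b ≤ q := by
  intro l
  induction l with
  | nil => intro b hm; cases hm
  | cons y l ih =>
    intro b hm
    rcases List.mem_cons.mp hm with h | h
    · subst h; exact le_trans (pv_fold_le step hle l (step b x)) (hx b)
    · exact ih (step b y) h

theorem pv_fold_cases {α : Type} (step : Nat → α → Nat) (P : α → Nat → Prop)
    (hcase : ∀ b x, step b x = b ∨ P x (step b x)) :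
    ∀ (l : List α) (b : Nat), l.foldl step b = b ∨ ∃ x ∈ l, P x (l.foldl step b) := by
  intro l
  induction l with
  | nil => intro b; exact Or.inl rfl
  | cons x l ih =>
    intro b
    rcases hcase b x with he | hp
    · rcases ih (step b x) with h1 | ⟨y, hy, hPy⟩
      · left
        simp only [List.foldl_cons, he]
        rw [he] at h1
        exact h1
      · right
        refine ⟨y, List.mem_cons_of_mem x hy, ?_⟩
        simpa only [List.foldl_cons] using hPy
    · rcases ih (step b x) with h1 | ⟨y, hy, hPy⟩
      · right
        refine ⟨x, List.mem_cons_self, ?_⟩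
        simp only [List.foldl_cons]
        rw [h1]
        exact hp
      · right
        refine ⟨y, List.mem_cons_of_mem x hy, ?_⟩
        simpa only [List.foldl_cons] using hPy

-- the inner step of pvBest
def pvStepIn (h : List Char) (i : Nat) (b : Nat) (kp : String × Nat) : Nat :=
  if PySem.Chars.startswith (h.drop i) kp.1.toList then min b kp.2 else b

theorem pvStepIn_le (h : List Char) (i : Nat) : ∀ b kp, pvStepIn h i b kp ≤ b := by
  intro b kp
  unfold pvStepIn
  split
  · exact min_le_left _ _
  · exact le_refl b

theorem pvBest_eq_fold (h : List Char) :
    pvBest h = (List.range h.length).foldl (fun b i => pvKw.foldl (pvStepIn h i) b) 6 := rfl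

theorem pvBest_le6 (h : List Char) : pvBest h ≤ 6 := by
  rw [pvBest_eq_fold]
  exact pv_fold_le _ (fun b i => pv_fold_le _ (pvStepIn_le h i) pvKw b) _ 6

theorem pvBest_le (h : List Char) (i : Nat) (kp : String × Nat)
    (hi : i < h.length) (hkp : kp ∈ pvKw)
    (hs : PySem.Chars.startswith (h.drop i) kp.1.toList = true) :
    pvBest h ≤ kp.2 := by
  rw [pvBest_eq_fold]
  refine pv_fold_le_of_mem _ (fun b j => pv_fold_le _ (pvStepIn_le h j) pvKw b) i kp.2
    (fun b => ?_) _ 6 (List.mem_range.mpr hi)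
  refine pv_fold_le_of_mem _ (pvStepIn_le h i) kp kp.2 (fun b => ?_) pvKw b hkp
  unfold pvStepIn
  rw [if_pos hs]
  exact min_le_right _ _

theorem pvBest_cases (h : List Char) :
    pvBest h = 6 ∨ ∃ i < h.length, ∃ kp ∈ pvKw,
      PySem.Chars.startswith (h.drop i) kp.1.toList = true ∧ pvBest h = kp.2 := by
  rw [pvBest_eq_fold]
  have inner : ∀ b i, pvKw.foldl (pvStepIn h i) b = b ∨
      ∃ kp ∈ pvKw, PySem.Chars.startswith (h.drop i) kp.1.toList = true ∧
        pvKw.foldl (pvStepIn h i) b = kp.2 := by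
    intro b i
    have := pv_fold_cases (pvStepIn h i)
      (fun kp r => PySem.Chars.startswith (h.drop i) kp.1.toList = true ∧ r = kp.2)
      (fun b kp => by
        unfold pvStepIn
        by_cases hs : PySem.Chars.startswith (h.drop i) kp.1.toList = true
        · rw [if_pos hs]
          rcases min_choice b kp.2 with hm | hm
          · exact Or.inl hm
          · exact Or.inr ⟨hs, hm⟩
        · rw [if_neg hs]; exact Or.inl rfl) pvKw b
    rcases this with h1 | ⟨kp, hkp, hs, hr⟩
    · exact Or.inl h1
    · exact Or.inr ⟨kp, hkp, hs, hr⟩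
  have := pv_fold_cases (fun b i => pvKw.foldl (pvStepIn h i) b)
    (fun i r => ∃ kp ∈ pvKw, PySem.Chars.startswith (h.drop i) kp.1.toList = true ∧ r = kp.2)
    (fun b i => inner b i) (List.range h.length) 6
  rcases this with h1 | ⟨i, hi, kp, hkp, hs, hr⟩
  · exact Or.inl h1
  · exact Or.inr ⟨i, List.mem_range.mp hi, kp, hkp, hs, hr⟩

-- a nonempty keyword starts at some position of h iff it is an infix (Python 'kw in h')
theorem pv_match_iff (h kw : List Char) (hkw : kw ≠ []) :
    (∃ i, i < h.length ∧ PySem.Chars.startswith (h.drop i) kw = true) ↔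
      PySem.Chars.isIn kw h = true := by
  rw [← PySem.Chars.exists_prefix_drop_iff_isIn]
  constructor
  · rintro ⟨i, _, hs⟩
    exact ⟨i, (PySem.Chars.startswith_iff _ _).1 hs⟩
  · rintro ⟨j, hp⟩
    refine ⟨j, ?_, (PySem.Chars.startswith_iff _ _).2 hp⟩
    by_contra hj
    push_neg at hj
    rw [List.drop_eq_nil_of_le hj] at hp
    exact hkw (List.prefix_nil.mp hp)

-- the keyword table is sound: every entry has a nonempty keyword and priority < 6
theorem pv_kw_sound : ∀ kp ∈ pvKw, kp.1.toList ≠ [] ∧ kp.2 < 6 := by decide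

-- from a keyword-table entry occurring in h, a bound on pvBest
theorem pvBest_le_kw (h : List Char) (kw : String) (k : Nat)
    (hmem : (kw, k) ∈ pvKw) (hin : PySem.Chars.isIn kw.toList h = true) :
    pvBest h ≤ k := by
  obtain ⟨i, hi, hs⟩ := (pv_match_iff h kw.toList (pv_kw_sound (kw, k) hmem).1).2 hin
  exact pvBest_le h i (kw, k) hi hmem hs

-- A's per-category condition, over the lowered character list
def pvCat : Nat → List String
  | 0 => ["web", "www", "nginx", "apache"]
  | 1 => ["db", "database", "mysql", "postgres", "mongo"]
  | 2 => ["api", "rest", "graphql"]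
  | 3 => ["cache", "redis", "memcache"]
  | 4 => ["queue", "rabbit", "kafka", "sqs"]
  | 5 => ["lb", "load", "balancer", "haproxy"]
  | _ => []

def pvC (k : Nat) (h : List Char) : Bool :=
  (pvCat k).any (fun kw => PySem.Chars.isIn kw.toList h)

theorem pv_kw_in_cat : ∀ kp ∈ pvKw, kp.1 ∈ pvCat kp.2 := by decide

theorem pv_hall0 : ∀ kw ∈ pvCat 0, (kw, 0) ∈ pvKw := by decide
theorem pv_hall1 : ∀ kw ∈ pvCat 1, (kw, 1) ∈ pvKw := by decide
theorem pv_hall2 : ∀ kw ∈ pvCat 2, (kw, 2) ∈ pvKw := by decide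
theorem pv_hall3 : ∀ kw ∈ pvCat 3, (kw, 3) ∈ pvKw := by decide
theorem pv_hall4 : ∀ kw ∈ pvCat 4, (kw, 4) ∈ pvKw := by decide
theorem pv_hall5 : ∀ kw ∈ pvCat 5, (kw, 5) ∈ pvKw := by decide

theorem pvBest_le_of_c (h : List Char) (k : Nat)
    (hall : ∀ kw ∈ pvCat k, (kw, k) ∈ pvKw) (hc : pvC k h = true) : pvBest h ≤ k := by
  obtain ⟨kw, hmem, hin⟩ := List.any_eq_true.mp hc
  exact pvBest_le_kw h kw k (hall kw hmem) hin

theorem pvBest_ne_of_not_c (h : List Char) (k : Nat) (hk : k < 6)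
    (hc : pvC k h = false) : pvBest h ≠ k := by
  intro he
  rcases pvBest_cases h with h6 | ⟨i, hi, kp, hkp, hs, hr⟩
  · omega
  · obtain ⟨hne, _⟩ := pv_kw_sound kp hkp
    have hin : PySem.Chars.isIn kp.1.toList h = true :=
      (pv_match_iff h kp.1.toList hne).1 ⟨i, hi, hs⟩
    have hcat : kp.1 ∈ pvCat kp.2 := pv_kw_in_cat kp hkp
    have : pvC k h = true := by
      have hk2 : kp.2 = k := by omega
      exact List.any_eq_true.mpr ⟨kp.1, hk2 ▸ hcat, hin⟩
    rw [hc] at this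
    cases this

-- ===== VERDICT (by name: the statement is the Claim_ definition above) =====
theorem infer_host_type_py_spec : Claim_equal_infer_host_type_py := by
  intro hostname host _
  unfold Spec_infer_host_type_py infer_host_type_py infer_host_type_py_alt
  simp only [PySem.Str.isIn_eq, PySem.Str.toList_lower]
  set h : List Char := PySem.Chars.lower hostname.toList with hh
  by_cases h0 : (["web", "www", "nginx", "apache"].any (fun kw => PySem.Chars.isIn kw.toList h)) = true
  · rw [if_pos h0]
    have hle : pvBest h ≤ 0 := pvBest_le_of_c h 0 pv_hall0 h0
    have hbe : pvBest h = 0 := by omega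
    rw [hbe]
    rfl
  · rw [if_neg h0]
    have n0 : pvBest h ≠ 0 := pvBest_ne_of_not_c h 0 (by omega) (Bool.eq_false_iff.mpr h0)
    by_cases h1 : (["db", "database", "mysql", "postgres", "mongo"].any (fun kw => PySem.Chars.isIn kw.toList h)) = true
    · rw [if_pos h1]
      have hle : pvBest h ≤ 1 := pvBest_le_of_c h 1 pv_hall1 h1
      have hbe : pvBest h = 1 := by omega
      rw [hbe]
      rfl
    · rw [if_neg h1]
      have n1 : pvBest h ≠ 1 := pvBest_ne_of_not_c h 1 (by omega) (Bool.eq_false_iff.mpr h1)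
      by_cases h2 : (["api", "rest", "graphql"].any (fun kw => PySem.Chars.isIn kw.toList h)) = true
      · rw [if_pos h2]
        have hle : pvBest h ≤ 2 := pvBest_le_of_c h 2 pv_hall2 h2
        have hbe : pvBest h = 2 := by omega
        rw [hbe]
        rfl
      · rw [if_neg h2]
        have n2 : pvBest h ≠ 2 := pvBest_ne_of_not_c h 2 (by omega) (Bool.eq_false_iff.mpr h2)
        by_cases h3 : (["cache", "redis", "memcache"].any (fun kw => PySem.Chars.isIn kw.toList h)) = true
        · rw [if_pos h3]
          have hle : pvBest h ≤ 3 := pvBest_le_of_c h 3 pv_hall3 h3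
          have hbe : pvBest h = 3 := by omega
          rw [hbe]
          rfl
        · rw [if_neg h3]
          have n3 : pvBest h ≠ 3 := pvBest_ne_of_not_c h 3 (by omega) (Bool.eq_false_iff.mpr h3)
          by_cases h4 : (["queue", "rabbit", "kafka", "sqs"].any (fun kw => PySem.Chars.isIn kw.toList h)) = true
          · rw [if_pos h4]
            have hle : pvBest h ≤ 4 := pvBest_le_of_c h 4 pv_hall4 h4
            have hbe : pvBest h = 4 := by omega
            rw [hbe]
            rfl
          · rw [if_neg h4]
            have n4 : pvBest h ≠ 4 := pvBest_ne_of_not_c h 4 (by omega) (Bool.eq_false_iff.mpr h4)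
            by_cases h5 : (["lb", "load", "balancer", "haproxy"].any (fun kw => PySem.Chars.isIn kw.toList h)) = true
            · rw [if_pos h5]
              have hle : pvBest h ≤ 5 := pvBest_le_of_c h 5 pv_hall5 h5
              have hbe : pvBest h = 5 := by omega
              rw [hbe]
              rfl
            · rw [if_neg h5]
              have n5 : pvBest h ≠ 5 := pvBest_ne_of_not_c h 5 (by omega) (Bool.eq_false_iff.mpr h5)
              have h6 := pvBest_le6 h
              have hbe : pvBest h = 6 := by omega
              rw [hbe]
              rfl
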